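-- pv_equiv track=rewrite | github.com/0gsd/XMVP | foley_talk.py | assign_kokoro_voice_deterministic
-- ===== SOURCE A (Python) =====
-- def assign_kokoro_voice_deterministic(actor_name, available_voices):
--     """
--     Deterministically assigns a (voice_name, pitch_shift) tuple to an actor.
--     Expansion Rule: neutral, +1, -2 for every voice.
--     """
--     if not available_voices:
--         return "af_bella", 0 # Fallback
--
--     # 1. Expand Palette
--     palette = []
--     for v in available_voices:
--         palette.append((v, 0))
--         palette.append((v, 1))
--         palette.append((v, -2))
--
--     # 2. Hash Actor Name
--     # Simple hash based on sum of ordinals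
--     seed = sum(ord(c) for c in actor_name)
--     idx = seed % len(palette)
--
--     return palette[idx]
-- ===== SOURCE B (Python) =====
-- def assign_kokoro_voice_deterministic(actor_name, available_voices):
--     """Same assignment without building the 3x palette: direct arithmetic indexing."""
--     if not available_voices:
--         return "af_bella", 0
--     idx = sum(map(ord, actor_name)) % (3 * len(available_voices))
--     return available_voices[idx // 3], (0, 1, -2)[idx % 3]
-- ===== Notes on version B (the rewrite author's own statement) =====
-- stated objective: faster
-- what changed: B skips building the 3x(voice,pitch) palette list and computes the selected voice and pitch directly by div/mod arithmetic on the hashed index.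
import Mathlib
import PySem

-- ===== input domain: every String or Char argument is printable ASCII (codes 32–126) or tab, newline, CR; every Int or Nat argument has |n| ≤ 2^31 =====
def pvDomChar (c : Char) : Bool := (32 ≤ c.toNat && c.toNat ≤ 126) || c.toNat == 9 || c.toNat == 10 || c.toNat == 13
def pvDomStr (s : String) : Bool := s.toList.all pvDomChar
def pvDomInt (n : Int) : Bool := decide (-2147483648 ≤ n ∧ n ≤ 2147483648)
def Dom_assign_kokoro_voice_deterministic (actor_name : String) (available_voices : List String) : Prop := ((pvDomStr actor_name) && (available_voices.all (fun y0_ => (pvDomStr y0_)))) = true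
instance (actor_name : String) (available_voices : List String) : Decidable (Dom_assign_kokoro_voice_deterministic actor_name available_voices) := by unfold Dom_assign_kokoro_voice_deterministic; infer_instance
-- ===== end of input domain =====

-- B replaces A's palette-building loop by direct div/mod arithmetic on the hashed index (faster by a constant factor).

-- ===== PORT A =====
def assign_kokoro_voice_deterministic (actor_name : String) (available_voices : List String) : String × Int :=
  if available_voices = [] then ("af_bella", 0)
  else
    let palette := available_voices.foldl (fun acc v => acc ++ [(v, (0:Int)), (v, 1), (v, -2)]) []
    let seed : Int := actor_name.toList.foldl (fun a c => a + (c.toNat : Int)) 0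
    let idx := PySem.Int.mod seed (palette.length : Int)
    -- palette[idx]: the index is provably in range, so the default is never returned
    (PySem.List.pyGet? palette idx).getD ("af_bella", 0)

-- ===== PORT B =====
def assign_kokoro_voice_deterministic_alt (actor_name : String) (available_voices : List String) : String × Int :=
  if available_voices = [] then ("af_bella", 0)
  else
    let idx := PySem.Int.mod (actor_name.toList.foldl (fun a c => a + (c.toNat : Int)) 0)
                 (3 * (available_voices.length : Int))
    -- both indexings are provably in range, so the defaults are never returned
    ((PySem.List.pyGet? available_voices (PySem.Int.floordiv idx 3)).getD "af_bella",
     (PySem.List.pyGet? [(0:Int), 1, -2] (PySem.Int.mod idx 3)).getD 0)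

-- ===== PRECONDITION & SPEC =====
def Spec_assign_kokoro_voice_deterministic (actor_name : String) (available_voices : List String) (out : String × Int) : Prop := out = assign_kokoro_voice_deterministic_alt actor_name available_voices
instance (actor_name : String) (available_voices : List String) (out : String × Int) : Decidable (Spec_assign_kokoro_voice_deterministic actor_name available_voices out) := by unfold Spec_assign_kokoro_voice_deterministic; infer_instance

-- ===== CLAIM (what is proved, stated in full; the proofs are below) =====
def Claim_equal_assign_kokoro_voice_deterministic : Prop := ∀ (actor_name : String) (available_voices : List String), Dom_assign_kokoro_voice_deterministic actor_name available_voices → Spec_assign_kokoro_voice_deterministic actor_name available_voices (assign_kokoro_voice_deterministic actor_name available_voices)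

-- ===== LEMMAS AND PROOFS =====

-- the seed foldl over Int is the cast of the corresponding Nat foldl
lemma pvSeed_natCast (l : List Char) (a : Nat) :
    l.foldl (fun a c => a + (c.toNat : Int)) (a : Int)
      = ((l.foldl (fun a c => a + c.toNat) a : Nat) : Int) := by
  induction l generalizing a with
  | nil => rfl
  | cons c cs ih =>
    simp only [List.foldl_cons, ← Nat.cast_add]
    exact ih (a + c.toNat)

-- the palette is a flatMap and has length 3·n
lemma pvPalette_len (vs : List String) :
    (vs.flatMap (fun v => [(v, (0:Int)), (v, 1), (v, -2)])).length = 3 * vs.length := by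
  induction vs with
  | nil => rfl
  | cons v rest ih => simp [List.flatMap_cons, ih]; omega

-- indexing the flattened palette = div/mod indexing
lemma pvPalette_get (vs : List String) (k : Nat) (hk : k < 3 * vs.length) :
    (vs.flatMap (fun v => [(v, (0:Int)), (v, 1), (v, -2)]))[k]?
      = some (vs.getD (k / 3) "af_bella", ([(0:Int), 1, -2]).getD (k % 3) 0) := by
  induction vs generalizing k with
  | nil => simp at hk
  | cons v rest ih =>
    match k, hk with
    | 0, _ => rfl
    | 1, _ => rfl
    | 2, _ => rfl
    | (m+3), hk =>
      have h3 : (m + 3) / 3 = m / 3 + 1 := by omega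
      have h3' : (m + 3) % 3 = m % 3 := by omega
      have hm : m < 3 * rest.length := by simp at hk; omega
      simp only [List.flatMap_cons, List.cons_append, List.nil_append,
        List.getElem?_cons_succ, h3, h3']
      rw [ih m hm]
      rfl

-- ===== VERDICT (by name: the statement is the Claim_ definition above) =====
theorem assign_kokoro_voice_deterministic_spec : Claim_equal_assign_kokoro_voice_deterministic := by
  intro actor_name vs _
  unfold Spec_assign_kokoro_voice_deterministic
  unfold assign_kokoro_voice_deterministic assign_kokoro_voice_deterministic_alt
  by_cases hvs : vs = []
  · simp [hvs]
  · simp only [if_neg hvs]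
    have hflat : vs.foldl (fun acc v => acc ++ [(v, (0:Int)), (v, 1), (v, -2)]) []
        = vs.flatMap (fun v => [(v, (0:Int)), (v, 1), (v, -2)]) := by
      simpa using PySem.List.foldl_append_eq_flatMap
        (fun v => [(v, (0:Int)), (v, 1), (v, -2)]) vs []
    have hn : 0 < vs.length := List.length_pos_iff.mpr hvs
    set s : Nat := actor_name.toList.foldl (fun a c => a + c.toNat) 0 with hs
    have hseed : actor_name.toList.foldl (fun a c => a + (c.toNat : Int)) 0 = (s : Int) := by
      simpa using pvSeed_natCast actor_name.toList 0
    set k : Nat := s % (3 * vs.length) with hkdef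
    have hk : k < 3 * vs.length := Nat.mod_lt _ (by omega)
    have hlen : ((vs.flatMap (fun v => [(v, (0:Int)), (v, 1), (v, -2)])).length : Int)
        = ((3 * vs.length : Nat) : Int) := by rw [pvPalette_len]
    have hmod : PySem.Int.mod (s : Int)
        ((vs.flatMap (fun v => [(v, (0:Int)), (v, 1), (v, -2)])).length : Int) = (k : Int) := by
      rw [hlen, PySem.Int.mod_natCast]
    have hmod2 : PySem.Int.mod (s : Int) (3 * (vs.length : Int)) = (k : Int) := by
      have : (3 : Int) * (vs.length : Int) = ((3 * vs.length : Nat) : Int) := by push_cast; ring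
      rw [this, PySem.Int.mod_natCast]
    have hfd : PySem.Int.floordiv (k : Int) 3 = ((k / 3 : Nat) : Int) := by
      exact_mod_cast PySem.Int.floordiv_natCast k 3
    have hm : PySem.Int.mod (k : Int) 3 = ((k % 3 : Nat) : Int) := by
      exact_mod_cast PySem.Int.mod_natCast k 3
    simp only [hflat, hseed, hmod, hmod2, hfd, hm, PySem.List.pyGet?_natCast]
    rw [pvPalette_get vs k hk]
    have hdiv : k / 3 < vs.length := by omega
    have hm3 : k % 3 < 3 := Nat.mod_lt _ (by omega)
    simp only [Option.getD_some]
    rw [List.getElem?_eq_getElem hdiv, List.getElem?_eq_getElem (by simpa using hm3)]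
    simp [List.getD, List.getElem?_eq_getElem hdiv]
    rw [List.getElem?_eq_getElem (show k % 3 < ([(0:Int), 1, -2]).length by simp; omega)]
    rfl
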